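-- pv_equiv track=rewrite | github.com/anip-protocol/anip | studio/server/assistant_service.py | _normalized_words
-- ===== SOURCE A (Python) =====
-- def _normalized_words(text: str) -> list[str]:
--     cleaned = []
--     current = []
--     for char in text.lower():
--         if char.isalnum():
--             current.append(char)
--         else:
--             if current:
--                 cleaned.append("".join(current))
--                 current = []
--     if current:
--         cleaned.append("".join(current))
--     return cleaned
-- ===== SOURCE B (Python) =====
-- def _normalized_words(text: str) -> list[str]:
--     s = text.lower()
--     words = []
--     i, n = 0, len(s)
--     while i < n:
--         if s[i].isalnum():
--             j = i + 1
--             while j < n and s[j].isalnum():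
--                 j += 1
--             words.append(s[i:j])
--             i = j
--         else:
--             i += 1
--     return words
-- ===== Notes on version B (the rewrite author's own statement) =====
-- stated objective: alternative
-- what changed: Replaces the per-character buffer/flush accumulator with a two-pointer run scan: find the end of each alphanumeric run and slice the word out directly, jumping past it, instead of appending characters to a current buffer and flushing on each separator.
import Mathlib
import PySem

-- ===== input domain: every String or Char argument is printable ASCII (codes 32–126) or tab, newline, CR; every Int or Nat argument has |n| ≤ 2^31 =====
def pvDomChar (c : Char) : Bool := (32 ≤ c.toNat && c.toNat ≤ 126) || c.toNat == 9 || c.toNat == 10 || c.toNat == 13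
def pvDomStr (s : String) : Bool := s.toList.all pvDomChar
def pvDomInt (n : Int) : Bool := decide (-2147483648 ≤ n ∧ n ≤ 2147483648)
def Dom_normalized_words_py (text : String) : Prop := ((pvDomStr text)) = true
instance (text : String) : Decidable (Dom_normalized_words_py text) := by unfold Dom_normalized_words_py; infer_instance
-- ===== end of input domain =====

-- B replaces A's per-character buffer/flush accumulator with a two-pointer run scan
-- (slice out each alphanumeric run and jump past it); alternative structure, same cost.

-- ===== PORT A =====
-- one loop step of A: state = (cleaned, current)
def pvAStep (st : List String × List Char) (c : Char) : List String × List Char :=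
  if PySem.Chars.isalnum c then (st.1, st.2 ++ [c])
  else if st.2 ≠ [] then (st.1 ++ [String.ofList st.2], []) else (st.1, [])

def normalized_words_py (text : String) : List String :=
  let st := (PySem.Chars.lower text.toList).foldl pvAStep ([], [])
  if st.2 ≠ [] then st.1 ++ [String.ofList st.2] else st.1

-- ===== PORT B =====
-- the while-loop of B over the remaining characters: an alnum run is sliced out
-- (takeWhile = the inner `while j < n` scan, dropWhile = the jump `i = j`)
def pvBGo (s : List Char) : List String :=
  match s with
  | [] => []
  | c :: cs =>
    if PySem.Chars.isalnum c then
      String.ofList (c :: cs.takeWhile PySem.Chars.isalnum) :: pvBGo (cs.dropWhile PySem.Chars.isalnum)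
    else pvBGo cs
termination_by s.length
decreasing_by
  · simpa using Nat.lt_succ_of_le (List.length_dropWhile_le _ _)
  · simp

def normalized_words_py_alt (text : String) : List String :=
  pvBGo (PySem.Chars.lower text.toList)

-- ===== PRECONDITION & SPEC =====
def Spec_normalized_words_py (text : String) (out : List String) : Prop := out = normalized_words_py_alt text
instance (text : String) (out : List String) : Decidable (Spec_normalized_words_py text out) := by unfold Spec_normalized_words_py; infer_instance

-- ===== CLAIM (what is proved, stated in full; the proofs are below) =====
def Claim_equal_normalized_words_py : Prop := ∀ (text : String), Dom_normalized_words_py text → Spec_normalized_words_py text (normalized_words_py text)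

-- ===== LEMMAS AND PROOFS =====

-- A's loop with a pending buffer `cur`, written as a structural recursion
def pvF (cur : List Char) : List Char → List String
  | [] => if cur ≠ [] then [String.ofList cur] else []
  | c :: cs =>
    if PySem.Chars.isalnum c then pvF (cur ++ [c]) cs
    else if cur ≠ [] then String.ofList cur :: pvF [] cs else pvF [] cs

-- A's foldl-plus-final-flush equals pvF, for any starting state
lemma pvA_foldl_eq (cs : List Char) : ∀ (acc : List String) (cur : List Char),
    (let st := cs.foldl pvAStep (acc, cur);
     if st.2 ≠ [] then st.1 ++ [String.ofList st.2] else st.1) = acc ++ pvF cur cs := by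
  induction cs with
  | nil =>
    intro acc cur
    by_cases h : cur = [] <;> simp [pvF, h]
  | cons c cs ih =>
    intro acc cur
    by_cases halnum : PySem.Chars.isalnum c
    · simpa [pvAStep, halnum, pvF] using ih acc (cur ++ [c])
    · by_cases hcur : cur = []
      · simpa [pvAStep, halnum, hcur, pvF] using ih acc []
      · simpa [pvAStep, halnum, hcur, pvF] using ih (acc ++ [String.ofList cur]) []

-- pvF with a nonempty pending buffer finishes the current run; with an empty buffer it is pvBGo
lemma pvF_eq_pvBGo (cs : List Char) :
    (∀ cur : List Char, cur ≠ [] →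
      pvF cur cs = String.ofList (cur ++ cs.takeWhile PySem.Chars.isalnum)
        :: pvBGo (cs.dropWhile PySem.Chars.isalnum)) ∧
    pvF [] cs = pvBGo cs := by
  induction cs with
  | nil =>
    refine ⟨fun cur hcur => ?_, ?_⟩ <;> simp [pvF, pvBGo, *]
  | cons c cs ih =>
    by_cases halnum : PySem.Chars.isalnum c
    · refine ⟨fun cur hcur => ?_, ?_⟩
      · simpa [pvF, halnum, List.takeWhile_cons, List.dropWhile_cons] using
          (ih.1 (cur ++ [c]) (by simp))
      · have := ih.1 [c] (by simp)
        simp only [pvF, halnum, if_true, List.nil_append] at this ⊢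
        rw [this]
        simp [pvBGo, halnum]
    · refine ⟨fun cur hcur => ?_, ?_⟩
      · simp [pvF, halnum, hcur, pvBGo, ih.2]
      · simp [pvF, halnum, pvBGo, ih.2]

-- ===== VERDICT (by name: the statement is the Claim_ definition above) =====
theorem normalized_words_py_spec : Claim_equal_normalized_words_py := by
  intro text _
  unfold Spec_normalized_words_py normalized_words_py normalized_words_py_alt
  rw [pvA_foldl_eq]
  simpa using (pvF_eq_pvBGo (PySem.Chars.lower text.toList)).2
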